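-- pv_equiv track=rewrite | github.com/borrabeam/Computer-Programming-1 | Com pro final/6210546676_Bannakorn_week9/6210546676_week9.py | count_region_freq
-- ===== SOURCE A (Python) =====
-- def count_region_freq(cities_data):
--     northern = 0
--     western = 0
--     southern = 0
--     central_eastern = 0
--
--     region = []
--     freq_list = []
--
--     for i in cities_data:
--         if i['region'] not in region:
--             region.append(i['region'])
--         else: pass
--
--
--     for i in range(len(cities_data)):
--         if cities_data[i]['region'] == 'Northern':
--             northern += 1
--         elif cities_data[i]['region'] == 'Western':
--             western += 1
--         elif cities_data[i]['region'] == 'Southern':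
--             southern += 1
--         elif cities_data[i]['region'] == 'Central and Eastern':
--             central_eastern += 1
--         else: pass
--
--     freq_list.append(northern)
--     freq_list.append(western)
--     freq_list.append(southern)
--     freq_list.append(central_eastern)
--
--     return  region, freq_list
-- ===== SOURCE B (Python) =====
-- def count_region_freq(cities_data):
--     # one pass: count every region in a dict (insertion order = first appearance)
--     counts = {}
--     for i in cities_data:
--         r = i['region']
--         counts[r] = counts.get(r, 0) + 1
--     region = list(counts)
--     freq_list = [counts.get('Northern', 0), counts.get('Western', 0),
--                  counts.get('Southern', 0), counts.get('Central and Eastern', 0)]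
--     return region, freq_list
-- ===== Notes on version B (the rewrite author's own statement) =====
-- stated objective: idiomatic
-- what changed: Replaces the two separate loops (membership-scan list build plus an index loop over four accumulator variables with an if/elif ladder) by a single counting pass into one dict, reading the distinct regions off its keys and the four fixed frequencies by lookup with default 0.
import Mathlib
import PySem

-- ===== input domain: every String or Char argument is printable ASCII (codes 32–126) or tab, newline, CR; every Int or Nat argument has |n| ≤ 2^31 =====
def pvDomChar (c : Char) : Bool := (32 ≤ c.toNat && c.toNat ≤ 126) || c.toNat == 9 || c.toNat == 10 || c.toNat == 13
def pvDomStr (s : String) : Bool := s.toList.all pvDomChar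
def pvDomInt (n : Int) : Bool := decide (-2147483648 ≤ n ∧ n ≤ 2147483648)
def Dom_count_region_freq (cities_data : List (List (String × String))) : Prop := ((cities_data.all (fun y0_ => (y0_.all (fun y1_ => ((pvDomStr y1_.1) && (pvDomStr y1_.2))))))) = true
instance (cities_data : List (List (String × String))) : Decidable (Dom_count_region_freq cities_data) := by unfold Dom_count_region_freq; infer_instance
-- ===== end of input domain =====

-- B replaces A's two loops (membership-scan list build + index loop with four if/elif accumulators)
-- by one counting pass into a dict whose keys give the distinct regions; objective: idiomatic.

-- i['region'] : first-match lookup in the association list (exact under Pre_, which demands the key)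
def regionOf (d : List (String × String)) : String :=
  ((d.find? (fun p => p.1 == "region")).map Prod.snd).getD ""

-- ===== PORT A =====
-- the if/elif ladder of A's second loop, on the four counters (n, w, s, c)
def quadStep (t : Int × Int × Int × Int) (r : String) : Int × Int × Int × Int :=
  if r == "Northern" then (t.1 + 1, t.2.1, t.2.2.1, t.2.2.2)
  else if r == "Western" then (t.1, t.2.1 + 1, t.2.2.1, t.2.2.2)
  else if r == "Southern" then (t.1, t.2.1, t.2.2.1 + 1, t.2.2.2)
  else if r == "Central and Eastern" then (t.1, t.2.1, t.2.2.1, t.2.2.2 + 1)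
  else t

def count_region_freq (cities_data : List (List (String × String))) : List String × List Int :=
  let region : List String :=
    cities_data.foldl
      (fun reg i => if reg.contains (regionOf i) then reg else reg ++ [regionOf i]) []
  let t :=
    (PySem.List.pyRange 0 (cities_data.length : Int) 1).foldl
      (fun t j => quadStep t (regionOf (PySem.List.pyGetD cities_data j []))) (0, 0, 0, 0)
  (region, [t.1, t.2.1, t.2.2.1, t.2.2.2])

-- ===== PORT B =====
def count_region_freq_alt (cities_data : List (List (String × String))) : List String × List Int :=
  let counts : PySem.Dict String Int :=
    cities_data.foldl
      (fun c i => c.insert (regionOf i) (c.getD (regionOf i) 0 + 1)) PySem.Dict.empty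
  (counts.keys,
   [counts.getD "Northern" 0, counts.getD "Western" 0,
    counts.getD "Southern" 0, counts.getD "Central and Eastern" 0])

-- ===== PRECONDITION & SPEC =====
-- Pre_ excludes exactly the inputs where A raises KeyError: a city dict without the key 'region'.
def Pre_count_region_freq (cities_data : List (List (String × String))) : Prop :=
  (cities_data.all (fun d => d.any (fun p => p.1 == "region"))) = true
instance (cities_data : List (List (String × String))) : Decidable (Pre_count_region_freq cities_data) := by unfold Pre_count_region_freq; infer_instance
def pvWitness_count_region_freq : (List (List (String × String))) :=
  [[("region", "Northern")], [("region", "Atlantis")]]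

def Spec_count_region_freq (cities_data : List (List (String × String))) (out : List String × List Int) : Prop := out = count_region_freq_alt cities_data
instance (cities_data : List (List (String × String))) (out : List String × List Int) : Decidable (Spec_count_region_freq cities_data out) := by unfold Spec_count_region_freq; infer_instance

-- ===== CLAIM (what is proved, stated in full; the proofs are below) =====
def Claim_equal_count_region_freq : Prop := ∀ (cities_data : List (List (String × String))), Dom_count_region_freq cities_data → Pre_count_region_freq cities_data → Spec_count_region_freq cities_data (count_region_freq cities_data)

-- ===== LEMMAS AND PROOFS =====

-- A's counter loop counts the four fixed regions
theorem quad_foldl (rs : List String) (n w s c : Int) :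
    rs.foldl quadStep (n, w, s, c)
      = (n + rs.count "Northern", w + rs.count "Western",
         s + rs.count "Southern", c + rs.count "Central and Eastern") := by
  induction rs generalizing n w s c with
  | nil => simp
  | cons r rs ih =>
    simp only [List.foldl_cons, List.count_cons, quadStep]
    split_ifs <;> simp_all [Prod.ext_iff] <;> omega

-- A's region loop builds the set of first occurrences
theorem region_foldl (cd : List (List (String × String))) :
    cd.foldl (fun reg i => if reg.contains (regionOf i) then reg else reg ++ [regionOf i]) []
      = PySem.Set.ofList (cd.map regionOf) := by
  rw [PySem.Set.ofList_eq_foldl, List.foldl_map]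
  rfl

-- B's counting loop is Counter(map regionOf cd)
theorem counts_eq_counter (cd : List (List (String × String))) :
    cd.foldl (fun c i => c.insert (regionOf i) (c.getD (regionOf i) 0 + 1)) PySem.Dict.empty
      = PySem.Dict.counter (cd.map regionOf) := by
  rw [← PySem.Dict.foldl_insert_getD_add_one_eq_counter, List.foldl_map]

-- ===== VERDICT (by name: the statement is the Claim_ definition above) =====
theorem count_region_freq_spec : Claim_equal_count_region_freq := by
  intro cd _ _
  unfold Spec_count_region_freq
  simp only [count_region_freq, count_region_freq_alt]
  rw [counts_eq_counter, region_foldl,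
      PySem.List.foldl_pyRange_zero_pyGetD' cd [] (fun t i => quadStep t (regionOf i)) (0, 0, 0, 0),
      ← List.foldl_map (f := regionOf) (g := quadStep), quad_foldl]
  simp [PySem.Dict.keys_counter, PySem.Dict.getD_counter]
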